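-- pv_equiv track=rewrite | github.com/7huahua/STS-Similarity | code/get_user_profile.py | find_max_frequent_support_patterns
-- ===== SOURCE A (Python) =====
-- def find_max_frequent_support_patterns(frequent_patterns):
--     max_frequent_patterns = []
--
--     # Sort the patterns based on their support in descending order
--     sorted_patterns = sorted(frequent_patterns, key=lambda x: (-x[0], x[1]))
--
--     for pattern in sorted_patterns:
--         is_max = True
--         support, itemset = pattern
--
--         for max_pattern in max_frequent_patterns:
--             _, max_itemset = max_pattern
--
--             # Check if the current pattern is a subset of any max_pattern
--             if set(itemset).issubset(set(max_itemset)):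
--                 is_max = False
--                 break
--
--         if is_max:
--             max_frequent_patterns.append(pattern)
--
--     return max_frequent_patterns
-- ===== SOURCE B (Python) =====
-- def find_max_frequent_support_patterns(frequent_patterns):
--     # Select-and-prune worklist: after sorting, the first remaining pattern is
--     # always maximal; take it, delete every later pattern it subsumes, repeat
--     # on the survivors. No result list is ever scanned.
--     patterns = sorted(frequent_patterns, key=lambda x: (-x[0], x[1]))
--     result = []
--     while patterns:
--         head = patterns[0]
--         result.append(head)
--         patterns = [q for q in patterns[1:]
--                     if not set(q[1]).issubset(set(head[1]))]
--     return result
-- ===== Notes on version B (the rewrite author's own statement) =====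
-- stated objective: alternative
-- what changed: B replaces A's accumulate-and-scan loop (test each pattern against the growing result list, append if maximal) by a select-and-prune recursion: take the first sorted pattern, delete every later pattern it subsumes, and recurse on the survivors; no result list is ever scanned.
import Mathlib
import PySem

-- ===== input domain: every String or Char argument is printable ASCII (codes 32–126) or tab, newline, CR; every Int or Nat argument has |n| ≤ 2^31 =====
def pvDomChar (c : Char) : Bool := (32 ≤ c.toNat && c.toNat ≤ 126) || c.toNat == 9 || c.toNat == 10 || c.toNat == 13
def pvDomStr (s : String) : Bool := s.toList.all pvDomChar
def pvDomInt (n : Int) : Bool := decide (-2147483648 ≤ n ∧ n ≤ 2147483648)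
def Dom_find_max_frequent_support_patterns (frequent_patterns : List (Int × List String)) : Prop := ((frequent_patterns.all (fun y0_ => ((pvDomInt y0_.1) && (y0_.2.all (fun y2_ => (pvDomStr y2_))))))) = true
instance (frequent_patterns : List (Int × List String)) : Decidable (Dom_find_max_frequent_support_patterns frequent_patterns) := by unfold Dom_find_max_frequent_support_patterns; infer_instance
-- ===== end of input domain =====

-- B replaces A's accumulate-and-scan loop by a select-and-prune recursion
-- (keep the first sorted pattern, drop what it subsumes, repeat); same output.

-- ===== PORT A =====
-- set(itemset).issubset(set(max_itemset))
def pvSub (a b : List String) : Bool :=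
  PySem.Set.issubset (PySem.Set.ofList a) (PySem.Set.ofList b)

def find_max_frequent_support_patterns (frequent_patterns : List (Int × List String)) : List (Int × List String) :=
  let sorted_patterns := PySem.List.sorted2 frequent_patterns (fun x => -x.1) (fun x => x.2)
  -- for pattern in sorted_patterns: inner for-loop with break = List.any over the result so far
  sorted_patterns.foldl
    (fun max_frequent_patterns pattern =>
      if max_frequent_patterns.any (fun max_pattern => pvSub pattern.2 max_pattern.2) then
        max_frequent_patterns
      else
        max_frequent_patterns ++ [pattern])
    []

-- ===== PORT B =====
-- while patterns: keep the first, drop what it subsumes, repeat on survivors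
def pvLoop (result : List (Int × List String)) : List (Int × List String) → List (Int × List String)
  | [] => result
  | head :: rest =>
    -- patterns = [q for q in patterns[1:] if not set(q[1]).issubset(set(head[1]))]
    pvLoop (result ++ [head]) (rest.filter (fun q => !(pvSub q.2 head.2)))
termination_by l => l.length
decreasing_by simp only [List.length_unattach]; exact Nat.lt_succ_of_le ((List.length_filter_le _ _).trans (by simp))

def find_max_frequent_support_patterns_alt (frequent_patterns : List (Int × List String)) : List (Int × List String) :=
  pvLoop [] (PySem.List.sorted2 frequent_patterns (fun x => -x.1) (fun x => x.2))

-- ===== PRECONDITION & SPEC =====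
def Spec_find_max_frequent_support_patterns (frequent_patterns : List (Int × List String)) (out : List (Int × List String)) : Prop := out = find_max_frequent_support_patterns_alt frequent_patterns
instance (frequent_patterns : List (Int × List String)) (out : List (Int × List String)) : Decidable (Spec_find_max_frequent_support_patterns frequent_patterns out) := by unfold Spec_find_max_frequent_support_patterns; infer_instance

-- ===== CLAIM (what is proved, stated in full; the proofs are below) =====
def Claim_equal_find_max_frequent_support_patterns : Prop := ∀ (frequent_patterns : List (Int × List String)), Dom_find_max_frequent_support_patterns frequent_patterns → Spec_find_max_frequent_support_patterns frequent_patterns (find_max_frequent_support_patterns frequent_patterns)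

-- ===== LEMMAS AND PROOFS =====

-- proof-only: pvLoop without its accumulator
def pvGo : List (Int × List String) → List (Int × List String)
  | [] => []
  | head :: rest => head :: pvGo (rest.filter (fun q => !(pvSub q.2 head.2)))
termination_by l => l.length
decreasing_by simp only [List.length_unattach]; exact Nat.lt_succ_of_le ((List.length_filter_le _ _).trans (by simp))

theorem pvLoop_eq_go (l : List (Int × List String)) :
    ∀ result, pvLoop result l = result ++ pvGo l := by
  induction l using pvGo.induct with
  | case1 => intro result; simp [pvLoop, pvGo]
  | case2 head rest ih =>
    intro result
    simp only [List.unattach_filter, List.unattach_attach] at ih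
    rw [pvLoop, pvGo, ih]
    simp

-- A's loop with accumulator acc over l equals acc followed by B's recursion on
-- l purged of everything already subsumed by acc.
theorem fold_eq_go (l : List (Int × List String)) :
    ∀ acc : List (Int × List String),
      l.foldl
        (fun mfp p => if mfp.any (fun mp => pvSub p.2 mp.2) then mfp else mfp ++ [p]) acc
      = acc ++ pvGo (l.filter (fun p => !(acc.any (fun m => pvSub p.2 m.2)))) := by
  induction l with
  | nil => intro acc; simp [pvGo]
  | cons p rest ih =>
    intro acc
    rw [List.foldl_cons, List.filter_cons]
    by_cases h : acc.any (fun m => pvSub p.2 m.2) = true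
    · rw [if_pos h]
      simp only [h, Bool.not_true, Bool.false_eq_true, if_false]
      exact ih acc
    · have hb : acc.any (fun m => pvSub p.2 m.2) = false := by
        revert h; cases acc.any (fun m => pvSub p.2 m.2) <;> simp
      rw [if_neg h]
      simp only [hb, Bool.not_false, if_true]
      rw [ih (acc ++ [p])]
      conv_rhs => rw [pvGo]
      simp only [List.filter_filter, List.append_assoc, List.singleton_append]
      congr 2
      refine congrArg pvGo (List.filter_congr ?_)
      intro q _
      simp only [List.any_append, List.any_cons, List.any_nil, Bool.or_false,
        Bool.not_or]
      cases pvSub q.2 p.2 <;> simp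

-- ===== VERDICT (by name: the statement is the Claim_ definition above) =====
theorem find_max_frequent_support_patterns_spec : Claim_equal_find_max_frequent_support_patterns := by
  intro fp _
  unfold Spec_find_max_frequent_support_patterns
  unfold find_max_frequent_support_patterns find_max_frequent_support_patterns_alt
  have h := fold_eq_go (PySem.List.sorted2 fp (fun x => -x.1) (fun x => x.2)) []
  rw [pvLoop_eq_go]
  simpa using h
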